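-- pv_equiv track=rewrite | github.com/eVen-gits/advent_of_code_2021 | day_17/code.py | calc_y
-- ===== SOURCE A (Python) =====
-- def calc_y(y_speed):
--     # Vertical speed at max y is 0
--     # Vertical speed at 0 is -(initial_speed+1)
--     ys = []
--     y = 0
--     while y >= 0:
--         ys.append(y)
--         y += y_speed
--         y_speed -= 1
--     return ys
-- ===== SOURCE B (Python) =====
-- def calc_y(y_speed):
--     # Closed form: position after k steps is k*y_speed - k*(k-1)//2;
--     # it stays non-negative for exactly n = 2*y_speed + 2 steps (n = 1 if y_speed < 0).
--     n = 2 * y_speed + 2 if y_speed >= 0 else 1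
--     return [k * y_speed - k * (k - 1) // 2 for k in range(n)]
-- ===== Notes on version B (the rewrite author's own statement) =====
-- stated objective: simpler
-- what changed: Replaced the mutating while-loop that steps position and speed with a closed form: the position after k steps is k*y_speed - k*(k-1)//2, and the list has exactly 2*y_speed+2 entries (1 if y_speed < 0), built by a single list comprehension.
import Mathlib
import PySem

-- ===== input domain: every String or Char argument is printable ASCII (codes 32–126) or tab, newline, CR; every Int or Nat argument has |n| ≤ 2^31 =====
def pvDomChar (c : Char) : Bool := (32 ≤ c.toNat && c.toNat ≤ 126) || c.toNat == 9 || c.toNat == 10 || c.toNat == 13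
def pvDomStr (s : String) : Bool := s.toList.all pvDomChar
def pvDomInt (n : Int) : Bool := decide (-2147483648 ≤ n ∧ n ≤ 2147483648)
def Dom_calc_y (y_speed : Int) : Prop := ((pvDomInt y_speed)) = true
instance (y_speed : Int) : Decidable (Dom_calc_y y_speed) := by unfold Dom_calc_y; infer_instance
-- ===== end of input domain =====

-- B replaces A's mutating while-loop by the closed form k*y_speed - k*(k-1)//2 over range(n); objective: simpler.

-- ===== PORT A =====
-- A's while-loop, state (ys, y, y_speed); the Nat fuel only makes it total
-- (calc_y passes fuel exceeding the loop's iteration count, proved in the lemmas below)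
def calcYLoop : Nat → List Int → Int → Int → List Int
  | 0, ys, _, _ => ys
  | fuel + 1, ys, y, v => if y ≥ 0 then calcYLoop fuel (ys ++ [y]) (y + v) (v - 1) else ys

def calc_y (y_speed : Int) : List Int :=
  calcYLoop ((2 * y_speed + 4).toNat + 1) [] 0 y_speed

-- ===== PORT B =====
def calc_y_alt (y_speed : Int) : List Int :=
  let n : Int := if y_speed ≥ 0 then 2 * y_speed + 2 else 1
  (PySem.List.pyRange 0 n 1).map (fun k => k * y_speed - PySem.Int.floordiv (k * (k - 1)) 2)

-- ===== PRECONDITION & SPEC =====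
def Spec_calc_y (y_speed : Int) (out : List Int) : Prop := out = calc_y_alt y_speed
instance (y_speed : Int) (out : List Int) : Decidable (Spec_calc_y y_speed out) := by unfold Spec_calc_y; infer_instance

-- ===== CLAIM (what is proved, stated in full; the proofs are below) =====
def Claim_equal_calc_y : Prop := ∀ (y_speed : Int), Dom_calc_y y_speed → Spec_calc_y y_speed (calc_y y_speed)

-- ===== LEMMAS AND PROOFS =====

theorem floordiv_tri (k : Int) : 2 * PySem.Int.floordiv (k * (k - 1)) 2 = k * (k - 1) := by
  rw [PySem.Int.floordiv_eq_ediv_of_pos (by norm_num)]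
  obtain ⟨t, ht⟩ : Even (k * (k - 1)) := by
    rcases Int.even_or_odd k with h | h
    · exact h.mul_right _
    · exact (h.sub_odd odd_one).mul_left _
  rw [ht]
  omega

-- the k-th position is non-negative exactly for the first n steps
theorem fk_nonneg_iff (v n k : Int)
    (hn : n = if v ≥ 0 then 2 * v + 2 else 1) (hk : 0 ≤ k) (hkn : k ≤ n) :
    (k * v - PySem.Int.floordiv (k * (k - 1)) 2 ≥ 0) ↔ k < n := by
  have ht := floordiv_tri k
  constructor
  · intro hge
    by_contra hlt
    have hkn' : k = n := by omega
    subst hkn'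
    split_ifs at hn with hv
    · have hk2 : k = 2 * v + 2 := hn
      subst hk2
      have hx : 2 * ((2*v+2) * v) - (2*v+2) * (2*v+2 - 1) = 2 * (-v - 1) := by ring
      omega
    · have hk2 : k = 1 := hn
      subst hk2
      have hx : 2 * ((1:Int) * v) - 1 * (1 - 1) = 2 * v := by ring
      omega
  · intro hlt
    split_ifs at hn with hv
    · have hb : 0 ≤ k * (2 * v + 1 - k) := mul_nonneg hk (by omega)
      have hx : 2 * (k * v) - k * (k - 1) = k * (2 * v + 1 - k) := by ring
      omega
    · have hk0 : k = 0 := by omega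
      subst hk0
      have h0 : PySem.Int.floordiv ((0:Int) * (0 - 1)) 2 = 0 := by decide
      rw [h0]
      simp

-- the loop, started at step k with enough fuel, appends exactly the remaining closed-form terms
theorem calcYLoop_closed (v n : Int) (hn : n = if v ≥ 0 then 2 * v + 2 else 1)
    (fuel : Nat) (k : Int) (acc : List Int) (hk : 0 ≤ k) (hkn : k ≤ n)
    (hf : (n - k).toNat ≤ fuel) :
    calcYLoop fuel acc (k * v - PySem.Int.floordiv (k * (k - 1)) 2) (v - k)
      = acc ++ (PySem.List.pyRange k n 1).map
          (fun k => k * v - PySem.Int.floordiv (k * (k - 1)) 2) := by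
  induction fuel generalizing k acc with
  | zero =>
    rw [PySem.List.pyRange_one_eq_nil (by omega), List.map_nil, List.append_nil]
    rfl
  | succ fuel ih =>
    rw [calcYLoop]
    by_cases hge : k * v - PySem.Int.floordiv (k * (k - 1)) 2 ≥ 0
    · have hlt : k < n := (fk_nonneg_iff v n k hn hk hkn).mp hge
      rw [if_pos hge]
      have ht := floordiv_tri k
      have ht1 := floordiv_tri (k + 1)
      have hx : 2 * ((k+1) * v) - (k+1) * (k+1 - 1)
          = 2 * (k * v) - k * (k - 1) + 2 * (v - k) := by ring
      have harg : (k * v - PySem.Int.floordiv (k * (k - 1)) 2) + (v - k)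
          = (k+1) * v - PySem.Int.floordiv ((k+1) * (k+1 - 1)) 2 := by omega
      have harg2 : v - k - 1 = v - (k + 1) := by ring
      rw [harg, harg2, ih (k + 1) _ (by omega) (by omega) (by omega),
          PySem.List.pyRange_one_cons hlt, List.map_cons]
      simp
    · have hkn' : ¬ k < n := fun h => hge ((fk_nonneg_iff v n k hn hk hkn).mpr h)
      rw [if_neg hge, PySem.List.pyRange_one_eq_nil (by omega), List.map_nil,
          List.append_nil]

-- ===== VERDICT (by name: the statement is the Claim_ definition above) =====
theorem calc_y_spec : Claim_equal_calc_y := by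
  intro v _
  show calc_y v = calc_y_alt v
  rw [calc_y, calc_y_alt]
  have h := calcYLoop_closed v (if v ≥ 0 then 2 * v + 2 else 1) rfl
      ((2 * v + 4).toNat + 1) 0 [] le_rfl (by split_ifs <;> omega)
      (by split_ifs <;> omega)
  simp only [zero_mul, zero_sub, sub_zero] at h
  have h0 : PySem.Int.floordiv (0:Int) 2 = 0 := by decide
  rw [h0] at h
  simpa using h
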